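-- pv_equiv track=rewrite | github.com/Tanishshriyan/cipher_toolkit | Classical_Cipher_Toolkit/frequency_analyzer.py | _calculate_word_score
-- ===== SOURCE A (Python) =====
-- def _calculate_word_score(text, common_words):
--     """Calculate score based on real English words with better boundary detection"""
--     words = text.lower().split()
--     word_score = 0
--     word_count = 0
--     found_words = []
--
--     for word in words:
--         # Remove all non-alphabet characters for checking
--         clean_word = ''.join(char for char in word if char.isalpha())
--
--         if not clean_word:
--             continue
--
--         # Exact match gets highest score
--         if clean_word in common_words:
--             word_score += 20
--             word_count += 1
--             found_words.append(clean_word)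
--             continue
--
--         # Check for common word endings/prefixes
--         base_word = clean_word
--
--         # Try removing common suffixes
--         suffixes = ['s', 'ed', 'ing', 'ly', 'er', 'est', 'ment', 'ness']
--         for suffix in suffixes:
--             if (len(base_word) > len(suffix) + 2 and
--                 base_word.endswith(suffix) and
--                 base_word[:-len(suffix)] in common_words):
--                 word_score += 15
--                 word_count += 1
--                 found_words.append(base_word[:-len(suffix)])
--                 break
--         else:  # If no suffix matched, try partial matches
--             # Check if word starts or ends with common words
--             for common in common_words:
--                 if len(common) > 3:
--                     if clean_word.startswith(common):
--                         word_score += 10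
--                         break
--                     elif clean_word.endswith(common):
--                         word_score += 10
--                         break
--
--     return word_score, word_count, found_words
-- ===== SOURCE B (Python) =====
-- SUFFIXES = ("s", "ed", "ing", "ly", "er", "est", "ment", "ness")
--
--
-- def _classify(clean, cw, long_cw):
--     """Score one cleaned word: (points, counted, found-word-or-None)."""
--     if clean in cw:
--         return 20, 1, clean
--     base = next((clean[:-len(s)] for s in SUFFIXES
--                  if len(clean) > len(s) + 2 and clean.endswith(s)
--                  and clean[:-len(s)] in cw), None)
--     if base is not None:
--         return 15, 1, base
--     if any(clean[:k] in long_cw or clean[-k:] in long_cw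
--            for k in range(4, len(clean) + 1)):
--         return 10, 0, None
--     return 0, 0, None
--
--
-- def _calculate_word_score(text, common_words):
--     """B: staged pipeline — clean the words, classify each against hash sets
--     (partial matches via clean's own prefixes/suffixes), then aggregate."""
--     cw = set(common_words)
--     long_cw = {w for w in common_words if len(w) > 3}
--     cleans = [''.join(ch for ch in w if ch.isalpha()) for w in text.lower().split()]
--     triples = [_classify(c, cw, long_cw) for c in cleans if c]
--     return (sum(t[0] for t in triples),
--             sum(t[1] for t in triples),
--             [t[2] for t in triples if t[2] is not None])
-- ===== Notes on version B (the rewrite author's own statement) =====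
-- stated objective: alternative
-- what changed: B is a staged pipeline (clean, classify each word against hash sets, then aggregate sums and found-list) instead of A's single fold with a triple accumulator, and replaces A's partial-match inner scan over all common words by membership tests of clean_word's own prefixes/suffixes (length >= 4) against a precomputed set.
import Mathlib
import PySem

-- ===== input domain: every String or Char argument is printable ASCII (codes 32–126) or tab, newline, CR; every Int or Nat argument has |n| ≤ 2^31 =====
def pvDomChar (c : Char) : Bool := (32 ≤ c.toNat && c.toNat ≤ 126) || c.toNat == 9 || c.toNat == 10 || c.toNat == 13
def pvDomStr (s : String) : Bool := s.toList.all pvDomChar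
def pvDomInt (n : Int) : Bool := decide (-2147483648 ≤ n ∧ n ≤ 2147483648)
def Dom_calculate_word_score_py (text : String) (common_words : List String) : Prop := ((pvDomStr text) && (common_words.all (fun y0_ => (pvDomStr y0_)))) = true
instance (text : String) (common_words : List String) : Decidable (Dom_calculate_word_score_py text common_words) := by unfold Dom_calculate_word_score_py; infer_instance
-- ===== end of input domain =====

-- B is a staged pipeline (clean, classify each word against sets, aggregate) instead of
-- A's single fold with a triple accumulator; partial matches are found by testing
-- clean_word's own prefixes/suffixes against a set instead of scanning all common words.

-- ===== PORT A =====

-- clean_word = ''.join(char for char in word if char.isalpha())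
def pvClean (w : List Char) : List Char := w.filter (fun c => PySem.Chars.isalpha c)

-- suffixes = ['s', 'ed', 'ing', 'ly', 'er', 'est', 'ment', 'ness']
def pvSuffixes : List (List Char) :=
  [['s'], ['e','d'], ['i','n','g'], ['l','y'], ['e','r'], ['e','s','t'],
   ['m','e','n','t'], ['n','e','s','s']]

-- A's 'for suffix in suffixes: … break' loop: first matching suffix yields the stripped word
def pvSufLoopA (cws : List String) (base : List Char) : List (List Char) → Option (List Char)
  | [] => none
  | suf :: rest =>
      if base.length > suf.length + 2 ∧ PySem.Chars.endswith base suf = true ∧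
         String.ofList (PySem.List.slice base none (some (-(suf.length : Int)))) ∈ cws then
        some (PySem.List.slice base none (some (-(suf.length : Int))))
      else pvSufLoopA cws base rest

-- A's 'for common in common_words: … break' partial-match loop (only the +10 matters)
def pvPartialA (clean : List Char) : List String → Bool
  | [] => false
  | common :: rest =>
      if 3 < PySem.Str.len common then
        if PySem.Chars.startswith clean common.toList then true
        else if PySem.Chars.endswith clean common.toList then true
        else pvPartialA clean rest
      else pvPartialA clean rest

-- one iteration of A's main loop over words; state = (word_score, word_count, found_words)
def pvBodyA (cws : List String) (st : Int × Int × List String) (clean : List Char) :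
    Int × Int × List String :=
  if clean = [] then st
  else if String.ofList clean ∈ cws then
    (st.1 + 20, st.2.1 + 1, st.2.2 ++ [String.ofList clean])
  else
    match pvSufLoopA cws clean pvSuffixes with
    | some b => (st.1 + 15, st.2.1 + 1, st.2.2 ++ [String.ofList b])
    | none => if pvPartialA clean cws then (st.1 + 10, st.2.1, st.2.2) else st

def pvStepA (cws : List String) (st : Int × Int × List String) (word : String) :
    Int × Int × List String :=
  pvBodyA cws st (pvClean word.toList)

def calculate_word_score_py (text : String) (common_words : List String) :
    Int × Int × List String :=
  (PySem.Str.split₀ (PySem.Str.lower text)).foldl (pvStepA common_words) (0, 0, [])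

-- ===== PORT B =====

-- SUFFIXES tuple of Source B
def pvSuffixesB : List String := ["s", "ed", "ing", "ly", "er", "est", "ment", "ness"]

-- _classify(clean, cw, long_cw): (points, counted, found-or-None); the 'next(… )'
-- generator over SUFFIXES is List.findSome?, the 'any(clean[:k]/clean[-k:] in long_cw)'
-- enumerates clean's own prefixes and suffixes of length 4..len(clean)
def pvClassify (cwset lcwset : PySem.Set String) (clean : List Char) :
    Int × Int × Option String :=
  if PySem.Set.contains cwset (String.ofList clean) then (20, 1, some (String.ofList clean))
  else
    match pvSuffixesB.findSome? (fun s =>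
        if clean.length > s.toList.length + 2 ∧ PySem.Chars.endswith clean s.toList = true ∧
           PySem.Set.contains cwset
             (String.ofList (clean.take (clean.length - s.toList.length))) = true then
          some (clean.take (clean.length - s.toList.length))
        else none) with
    | some base => (15, 1, some (String.ofList base))
    | none =>
        if (PySem.List.pyRange 4 ((clean.length : Int) + 1)).any (fun k =>
             PySem.Set.contains lcwset (String.ofList (clean.take k.toNat)) ||
             PySem.Set.contains lcwset (String.ofList (clean.drop (clean.length - k.toNat))))
        then (10, 0, none) else (0, 0, none)

def calculate_word_score_py_alt (text : String) (common_words : List String) :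
    Int × Int × List String :=
  let cwset := PySem.Set.ofList common_words
  let lcwset := PySem.Set.ofList (common_words.filter (fun w => 3 < PySem.Str.len w))
  let cleans := (PySem.Str.split₀ (PySem.Str.lower text)).map
    (fun w => w.toList.filter (fun ch => PySem.Chars.isalpha ch))
  let triples := (cleans.filter (fun c => !c.isEmpty)).map (pvClassify cwset lcwset)
  ((triples.map (fun t => t.1)).sum,
   (triples.map (fun t => t.2.1)).sum,
   triples.filterMap (fun t => t.2.2))

-- ===== PRECONDITION & SPEC =====
def Spec_calculate_word_score_py (text : String) (common_words : List String) (out : Int × Int × List String) : Prop := out = calculate_word_score_py_alt text common_words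
instance (text : String) (common_words : List String) (out : Int × Int × List String) : Decidable (Spec_calculate_word_score_py text common_words out) := by unfold Spec_calculate_word_score_py; infer_instance

-- ===== CLAIM (what is proved, stated in full; the proofs are below) =====
def Claim_equal_calculate_word_score_py : Prop := ∀ (text : String) (common_words : List String), Dom_calculate_word_score_py text common_words → Spec_calculate_word_score_py text common_words (calculate_word_score_py text common_words)

-- ===== LEMMAS AND PROOFS =====

-- set(common_words) membership = list membership
theorem pv_contains_ofList (xs : List String) (y : String) :
    PySem.Set.contains (PySem.Set.ofList xs) y = decide (y ∈ xs) := by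
  simp only [PySem.Set.contains, List.contains_eq_mem, PySem.Set.mem_ofList]

-- A's suffix loop = B's findSome? over the same (nonempty) suffixes
theorem pv_sufLoop_eq (cws : List String) (base : List Char) (sufs : List String)
    (h : ∀ s ∈ sufs, s.toList ≠ []) :
    pvSufLoopA cws base (sufs.map String.toList) =
      sufs.findSome? (fun s =>
        if base.length > s.toList.length + 2 ∧ PySem.Chars.endswith base s.toList = true ∧
           PySem.Set.contains (PySem.Set.ofList cws)
             (String.ofList (base.take (base.length - s.toList.length))) = true then
          some (base.take (base.length - s.toList.length))
        else none) := by
  induction sufs with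
  | nil => rfl
  | cons suf rest ih =>
      have hsuf : suf.toList ≠ [] := h suf (List.mem_cons_self)
      have hlen : 0 < suf.toList.length := List.length_pos_of_ne_nil hsuf
      have hsl : PySem.List.slice base none (some (-(suf.toList.length : Int)))
          = base.take (base.length - suf.toList.length) :=
        PySem.List.slice_to_neg_natCast base suf.toList.length hlen
      have ih' := ih (fun s hs => h s (List.mem_cons_of_mem _ hs))
      simp only [List.map_cons, pvSufLoopA, List.findSome?_cons, hsl]
      have hiff : (base.length > suf.toList.length + 2 ∧
            PySem.Chars.endswith base suf.toList = true ∧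
            String.ofList (base.take (base.length - suf.toList.length)) ∈ cws) ↔
          (base.length > suf.toList.length + 2 ∧
            PySem.Chars.endswith base suf.toList = true ∧
            PySem.Set.contains (PySem.Set.ofList cws)
              (String.ofList (base.take (base.length - suf.toList.length))) = true) := by
        rw [pv_contains_ofList]; simp
      by_cases hca : base.length > suf.toList.length + 2 ∧
          PySem.Chars.endswith base suf.toList = true ∧
          String.ofList (base.take (base.length - suf.toList.length)) ∈ cws
      · rw [if_pos hca, if_pos (hiff.mp hca)]
      · rw [if_neg hca, if_neg (fun hcb => hca (hiff.mpr hcb)), ih']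

-- A's partial-match loop decides the existence of a long common word that is a prefix/suffix
theorem pv_partialA_iff (clean : List Char) (cws : List String) :
    pvPartialA clean cws = true ↔
      ∃ c ∈ cws, 3 < c.toList.length ∧ (c.toList <+: clean ∨ c.toList <:+ clean) := by
  induction cws with
  | nil => simp [pvPartialA]
  | cons common rest ih =>
      have hcond : (3 : Int) < PySem.Str.len common ↔ 3 < common.toList.length := by
        rw [PySem.Str.len_eq]; omega
      simp only [pvPartialA]
      by_cases hl : 3 < common.toList.length
      · rw [if_pos (hcond.mpr hl)]
        by_cases hp : PySem.Chars.startswith clean common.toList = true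
        · rw [if_pos hp]
          exact ⟨fun _ => ⟨common, List.mem_cons_self, hl,
            Or.inl ((PySem.Chars.startswith_iff clean common.toList).mp hp)⟩, fun _ => rfl⟩
        · rw [if_neg hp]
          by_cases he : PySem.Chars.endswith clean common.toList = true
          · rw [if_pos he]
            exact ⟨fun _ => ⟨common, List.mem_cons_self, hl,
              Or.inr ((PySem.Chars.endswith_iff clean common.toList).mp he)⟩, fun _ => rfl⟩
          · rw [if_neg he, ih]
            constructor
            · rintro ⟨c, hc, h3, hps⟩; exact ⟨c, List.mem_cons_of_mem _ hc, h3, hps⟩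
            · rintro ⟨c, hc, h3, hps⟩
              rcases List.mem_cons.mp hc with rfl | hc'
              · rcases hps with hpre | hsuf
                · exact absurd ((PySem.Chars.startswith_iff clean c.toList).mpr hpre) hp
                · exact absurd ((PySem.Chars.endswith_iff clean c.toList).mpr hsuf) he
              · exact ⟨c, hc', h3, hps⟩
      · rw [if_neg (fun hh => hl (hcond.mp hh)), ih]
        constructor
        · rintro ⟨c, hc, h3, hps⟩; exact ⟨c, List.mem_cons_of_mem _ hc, h3, hps⟩
        · rintro ⟨c, hc, h3, hps⟩
          rcases List.mem_cons.mp hc with rfl | hc'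
          · exact absurd h3 hl
          · exact ⟨c, hc', h3, hps⟩

-- membership in the long-word set
theorem pv_contains_long (cws : List String) (y : String) :
    PySem.Set.contains (PySem.Set.ofList (cws.filter (fun w => 3 < PySem.Str.len w))) y = true ↔
      y ∈ cws ∧ 3 < y.toList.length := by
  rw [pv_contains_ofList, decide_eq_true_eq, List.mem_filter, decide_eq_true_eq,
    PySem.Str.len_eq]
  constructor
  · rintro ⟨h1, h2⟩; exact ⟨h1, by exact_mod_cast h2⟩
  · rintro ⟨h1, h2⟩; exact ⟨h1, by exact_mod_cast h2⟩

-- B's prefix/suffix enumeration decides the same existence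
theorem pv_partialB_iff (clean : List Char) (cws : List String) :
    ((PySem.List.pyRange 4 ((clean.length : Int) + 1)).any (fun k =>
       PySem.Set.contains (PySem.Set.ofList (cws.filter (fun w => 3 < PySem.Str.len w)))
         (String.ofList (clean.take k.toNat)) ||
       PySem.Set.contains (PySem.Set.ofList (cws.filter (fun w => 3 < PySem.Str.len w)))
         (String.ofList (clean.drop (clean.length - k.toNat))))) = true ↔
      ∃ c ∈ cws, 3 < c.toList.length ∧ (c.toList <+: clean ∨ c.toList <:+ clean) := by
  rw [List.any_eq_true]
  constructor
  · rintro ⟨k, hk, hor⟩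
    rcases Bool.or_eq_true_iff.mp hor with h | h
    · obtain ⟨hmem, h3⟩ := (pv_contains_long _ _).mp h
      refine ⟨_, hmem, h3, Or.inl ?_⟩
      simp only [String.toList_ofList]; exact List.take_prefix _ _
    · obtain ⟨hmem, h3⟩ := (pv_contains_long _ _).mp h
      refine ⟨_, hmem, h3, Or.inr ?_⟩
      simp only [String.toList_ofList]; exact List.drop_suffix _ _
  · rintro ⟨c, hc, h3, hps⟩
    refine ⟨(c.toList.length : Int), ?_, ?_⟩
    · apply PySem.List.mem_pyRange_one.mpr
      constructor
      · exact_mod_cast h3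
      · have : c.toList.length ≤ clean.length := by
          rcases hps with h | h
          · exact h.length_le
          · exact h.length_le
        omega
    · have hk : ((c.toList.length : Int)).toNat = c.toList.length := by simp
      rcases hps with hpre | hsuf
      · apply Bool.or_eq_true_iff.mpr; left
        have ht : clean.take c.toList.length = c.toList := (List.prefix_iff_eq_take.mp hpre).symm
        rw [hk, ht, String.ofList_toList]
        exact (pv_contains_long cws c).mpr ⟨hc, h3⟩
      · apply Bool.or_eq_true_iff.mpr; right
        have hd : clean.drop (clean.length - c.toList.length) = c.toList :=
          (List.suffix_iff_eq_drop.mp hsuf).symm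
        rw [hk, hd, String.ofList_toList]
        exact (pv_contains_long cws c).mpr ⟨hc, h3⟩

-- one non-empty clean word: A's loop body adds exactly B's classification deltas
theorem pv_body_classify (cws : List String) (st : Int × Int × List String)
    (clean : List Char) (hne : clean ≠ []) :
    pvBodyA cws st clean =
      (st.1 + (pvClassify (PySem.Set.ofList cws)
                 (PySem.Set.ofList (cws.filter (fun w => 3 < PySem.Str.len w))) clean).1,
       st.2.1 + (pvClassify (PySem.Set.ofList cws)
                 (PySem.Set.ofList (cws.filter (fun w => 3 < PySem.Str.len w))) clean).2.1,
       st.2.2 ++ (pvClassify (PySem.Set.ofList cws)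
                 (PySem.Set.ofList (cws.filter (fun w => 3 < PySem.Str.len w))) clean).2.2.toList) := by
  have hsufs : pvSuffixes = pvSuffixesB.map String.toList := by decide
  unfold pvBodyA pvClassify
  rw [if_neg hne, hsufs, pv_sufLoop_eq cws clean pvSuffixesB (by decide)]
  by_cases hex : String.ofList clean ∈ cws
  · have hexB : PySem.Set.contains (PySem.Set.ofList cws) (String.ofList clean) = true := by
      rw [pv_contains_ofList]; simp [hex]
    simp only [if_pos hex, if_pos hexB]
    simp
  · have hexB : ¬ PySem.Set.contains (PySem.Set.ofList cws) (String.ofList clean) = true := by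
      rw [pv_contains_ofList]; simp [hex]
    simp only [if_neg hex, if_neg hexB]
    cases hfind : pvSuffixesB.findSome? (fun s =>
        if clean.length > s.toList.length + 2 ∧ PySem.Chars.endswith clean s.toList = true ∧
           PySem.Set.contains (PySem.Set.ofList cws)
             (String.ofList (clean.take (clean.length - s.toList.length))) = true then
          some (clean.take (clean.length - s.toList.length))
        else none) with
    | some b => simp
    | none =>
        by_cases hp : pvPartialA clean cws = true
        · have hB2 := (pv_partialB_iff clean cws).mpr ((pv_partialA_iff clean cws).mp hp)
          simp only [if_pos hp, if_pos hB2]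
          simp
        · have hB2 : ¬ (((PySem.List.pyRange 4 ((clean.length : Int) + 1)).any (fun k =>
             PySem.Set.contains (PySem.Set.ofList (cws.filter (fun w => 3 < PySem.Str.len w)))
               (String.ofList (clean.take k.toNat)) ||
             PySem.Set.contains (PySem.Set.ofList (cws.filter (fun w => 3 < PySem.Str.len w)))
               (String.ofList (clean.drop (clean.length - k.toNat))))) = true) :=
            fun hB => hp ((pv_partialA_iff clean cws).mpr ((pv_partialB_iff clean cws).mp hB))
          simp only [if_neg hp, if_neg hB2]
          simp

-- folding A's body = B's three aggregations over the classified non-empty cleans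
theorem pv_fold_eq (cws : List String) (cleans : List (List Char))
    (s c : Int) (f : List String) :
    cleans.foldl (pvBodyA cws) (s, c, f) =
      (s + (((cleans.filter (fun x => !x.isEmpty)).map
              (pvClassify (PySem.Set.ofList cws)
                (PySem.Set.ofList (cws.filter (fun w => 3 < PySem.Str.len w))))).map
              (fun t => t.1)).sum,
       c + (((cleans.filter (fun x => !x.isEmpty)).map
              (pvClassify (PySem.Set.ofList cws)
                (PySem.Set.ofList (cws.filter (fun w => 3 < PySem.Str.len w))))).map
              (fun t => t.2.1)).sum,
       f ++ ((cleans.filter (fun x => !x.isEmpty)).map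
              (pvClassify (PySem.Set.ofList cws)
                (PySem.Set.ofList (cws.filter (fun w => 3 < PySem.Str.len w))))).filterMap
              (fun t => t.2.2)) := by
  induction cleans generalizing s c f with
  | nil => simp
  | cons clean rest ih =>
      by_cases hne : clean = []
      · subst hne
        rw [List.foldl_cons]
        have h1 : pvBodyA cws (s, c, f) [] = (s, c, f) := by simp [pvBodyA]
        rw [h1, ih]
        simp
      · have hkeep : (!clean.isEmpty) = true := by simp [hne]
        rw [List.foldl_cons, pv_body_classify cws (s, c, f) clean hne, ih,
          List.filter_cons, if_pos hkeep]
        cases hcl : (pvClassify (PySem.Set.ofList cws)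
            (PySem.Set.ofList (cws.filter (fun w => 3 < PySem.Str.len w))) clean).2.2 with
        | none =>
            simp only [List.map_cons, List.sum_cons, List.filterMap_cons, hcl]
            refine Prod.ext (by ring) (Prod.ext (by ring) ?_)
            simp
        | some b =>
            simp only [List.map_cons, List.sum_cons, List.filterMap_cons, hcl]
            refine Prod.ext (by ring) (Prod.ext (by ring) ?_)
            simp

-- ===== VERDICT (by name: the statement is the Claim_ definition above) =====
theorem calculate_word_score_py_spec : Claim_equal_calculate_word_score_py := by
  intro text cws _
  unfold Spec_calculate_word_score_py calculate_word_score_py calculate_word_score_py_alt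
  have hmap : ∀ (ws : List String),
      ws.foldl (pvStepA cws) ((0 : Int), (0 : Int), ([] : List String)) =
        (ws.map (fun w => w.toList.filter (fun ch => PySem.Chars.isalpha ch))).foldl
          (pvBodyA cws) (0, 0, []) := by
    intro ws
    rw [List.foldl_map]
    rfl
  rw [hmap, pv_fold_eq]
  simp
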